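-- pv_equiv track=rewrite | github.com/afni/afni | src/python_scripts/afni_python/afni_util.py | align_wrappers
-- ===== SOURCE A (Python) =====
-- def align_wrappers(command):
--     """align all '\\\n' strings to be the largest offset
--        from the previous '\n'"""
--
--     # first, find the maximum offset
--     posn = 0
--     max  = -1
--     while 1:
--         next = command.find('\n',posn)
--         if next < 0: break
--         if next > posn and command[next-1] == '\\':  # check against max
--             width = next - 1 - posn
--             if width > max: max = width
--         posn = next + 1 # look past it
--
--     if max < 0: return command  # none found
--
--     # repeat the previous loop, but adding appropriate spaces
--     new_cmd = ''
--     posn = 0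
--     while 1:
--         next = command.find('\n',posn)
--         if next < 0: break
--         if next > posn and command[next-1] == '\\':  # check against max
--             width = next - 1 - posn
--             if width < max:     # then insert appropriate spaces
--                 new_cmd += command[posn:next-1] + ' '*(max-width) + '\\\n'
--                 posn = next + 1
--                 continue
--
--         # just duplicate from the previous posn
--         new_cmd += command[posn:next+1]
--         posn = next + 1 # look past it
--
--     if posn < len(command): new_cmd += command[posn:]
--
--     return new_cmd
-- ===== SOURCE B (Python) =====
-- def align_wrappers(command):
--     """align all '\\\n' strings to be the largest offset
--        from the previous '\n'"""
--     # Single pass, online: maintain the already-aligned output for the prefix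
--     # seen so far; when a wider wrapper line appears, re-pad the accumulated
--     # lines to the new width.  pad() is the identity on non-wrapper lines.
--     def pad(line, w):
--         if line.endswith('\\'):
--             return line[:-1] + ' ' * (w - (len(line) - 1)) + '\\'
--         return line
--     parts = command.split('\n')
--     out = []
--     mx = -1
--     for part in parts[:-1]:
--         if part.endswith('\\') and len(part) - 1 > mx:
--             mx = len(part) - 1
--             out = [pad(l, mx) for l in out]
--         out.append(pad(part, mx))
--     if mx < 0:
--         return command
--     return '\n'.join(out) + '\n' + parts[-1]
-- ===== Notes on version B (the rewrite author's own statement) =====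
-- stated objective: alternative
-- what changed: A makes two full passes over the string (first a find-based scan computing the maximum backslash column, then a second scan rebuilding with padding); B is a single online pass over the lines that maintains the already-aligned output for the prefix seen so far and re-pads the accumulated lines whenever a wider wrapper line appears, so the maximum is never computed in advance.
import Mathlib
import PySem

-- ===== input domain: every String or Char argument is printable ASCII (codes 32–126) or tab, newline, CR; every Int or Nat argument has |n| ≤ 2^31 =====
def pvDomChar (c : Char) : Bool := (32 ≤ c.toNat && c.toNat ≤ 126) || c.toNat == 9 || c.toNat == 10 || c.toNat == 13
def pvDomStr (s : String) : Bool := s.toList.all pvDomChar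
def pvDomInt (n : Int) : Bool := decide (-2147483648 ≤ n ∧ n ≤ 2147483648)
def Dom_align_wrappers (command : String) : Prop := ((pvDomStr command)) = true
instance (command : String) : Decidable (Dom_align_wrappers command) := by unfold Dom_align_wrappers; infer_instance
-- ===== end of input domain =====

-- B replaces A's two whole-string passes (a newline-find scan computing the maximum backslash
-- column, then a second scan rebuilding with padding) by ONE online pass over the lines that
-- keeps the already-aligned output for the prefix seen so far, re-padding the accumulated
-- lines whenever a wider wrapper line appears (objective: alternative algorithm).

-- ===== PORT A =====
-- command.find('\n', posn)
def awFindNl (s : List Char) (posn : Int) : Int := PySem.Chars.findFrom s ['\n'] posn none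

-- first while loop: find the maximum offset (fuel = |s|+1 bounds the iterations: each one moves posn past a newline)
def awMaxLoop (s : List Char) : Nat → Int → Int → Int
  | 0, _, mx => mx
  | fuel+1, posn, mx =>
    let next := awFindNl s posn
    if next < 0 then mx
    else
      let mx' := if next > posn ∧ PySem.List.pyGet? s (next - 1) = some '\\' then
          (if next - 1 - posn > mx then next - 1 - posn else mx)
        else mx
      awMaxLoop s fuel (next + 1) mx'

-- second while loop; returns (new_cmd, posn) at loop exit (the 'continue' branch and the
-- fall-through duplicate branch are kept in Python's order)
def awBuildLoop (s : List Char) : Nat → Int → List Char → Int → (List Char × Int)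
  | 0, posn, acc, _ => (acc, posn)
  | fuel+1, posn, acc, mx =>
    let next := awFindNl s posn
    if next < 0 then (acc, posn)
    else if next > posn ∧ PySem.List.pyGet? s (next - 1) = some '\\' then
      (if next - 1 - posn < mx then
        awBuildLoop s fuel (next + 1)
          (acc ++ PySem.List.slice s (some posn) (some (next - 1))
               ++ List.replicate (mx - (next - 1 - posn)).toNat ' ' ++ ['\\', '\n']) mx
      else
        awBuildLoop s fuel (next + 1) (acc ++ PySem.List.slice s (some posn) (some (next + 1))) mx)
    else
      awBuildLoop s fuel (next + 1) (acc ++ PySem.List.slice s (some posn) (some (next + 1))) mx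

def align_wrappers (command : String) : String :=
  let s := command.toList
  let mx := awMaxLoop s (s.length + 1) 0 (-1)
  if mx < 0 then command
  else
    let r := awBuildLoop s (s.length + 1) 0 [] mx
    let out := if r.2 < (s.length : Int) then r.1 ++ PySem.List.slice s (some r.2) none else r.1
    String.ofList out

-- ===== PORT B =====
-- pad(line, w): line[:-1] + ' ' * (w - (len(line) - 1)) + '\\' if line ends with '\\', else line
def awPad (w : Int) (line : List Char) : List Char :=
  if PySem.Chars.endswith line ['\\'] then
    PySem.List.slice line none (some (-1)) ++ List.replicate (w - ((line.length : Int) - 1)).toNat ' ' ++ ['\\']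
  else line

-- the body of B's single for-loop over parts[:-1]: state is (out, mx); on a wider wrapper
-- line the accumulated output is re-padded to the new width before appending
def awStep (st : List (List Char) × Int) (part : List Char) : List (List Char) × Int :=
  if PySem.Chars.endswith part ['\\'] ∧ (part.length : Int) - 1 > st.2 then
    let mx := (part.length : Int) - 1
    (st.1.map (fun l => awPad mx l) ++ [awPad mx part], mx)
  else (st.1 ++ [awPad st.2 part], st.2)

def align_wrappers_alt (command : String) : String :=
  -- command.split('\n'): List.splitOn is exact for a one-character separator
  let parts := command.toList.splitOn '\n'
  let r := parts.dropLast.foldl awStep ([], -1)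
  if r.2 < 0 then command
  else String.ofList (PySem.Chars.join ['\n'] r.1 ++ '\n' :: parts.getLastD [])

-- ===== PRECONDITION & SPEC =====
def Spec_align_wrappers (command : String) (out : String) : Prop := out = align_wrappers_alt command
instance (command : String) (out : String) : Decidable (Spec_align_wrappers command out) := by unfold Spec_align_wrappers; infer_instance

-- ===== CLAIM (what is proved, stated in full; the proofs are below) =====
def Claim_equal_align_wrappers : Prop := ∀ (command : String), Dom_align_wrappers command → Spec_align_wrappers command (align_wrappers command)

-- ===== LEMMAS AND PROOFS =====

theorem aw_singleton_prefix_iff (l : List Char) (c : Char) : [c] <+: l ↔ l[0]? = some c := by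
  cases l with
  | nil => simp
  | cons x xs => simp [List.cons_prefix_cons, eq_comm]

theorem aw_endswith_iff (l : List Char) (c : Char) :
    PySem.Chars.endswith l [c] = true ↔ l.getLast? = some c := by
  simp only [PySem.Chars.endswith, List.isSuffixOf_iff_suffix]
  constructor
  · rintro ⟨t, ht⟩
    rw [← ht]; simp
  · intro h
    obtain ⟨ys, rfl⟩ := List.getLast?_eq_some_iff.1 h
    exact ⟨ys, rfl⟩

-- one step of A's find('\n', posn) scan, characterised structurally
theorem aw_findNl_step (s : List Char) (k : Nat) (hk : k ≤ s.length) :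
    (awFindNl s k = -1 ∧ '\n' ∉ s.drop k) ∨
    (∃ seg : List Char, '\n' ∉ seg ∧ s.drop k = seg ++ '\n' :: s.drop (k + seg.length + 1)
       ∧ awFindNl s k = (k : Int) + seg.length ∧ k + seg.length < s.length) := by
  by_cases h : awFindNl s (k : Int) = -1
  · left
    refine ⟨h, fun hm => ?_⟩
    rw [awFindNl, PySem.Chars.findFrom_natCast_eq_neg_one_iff s _ k hk] at h
    apply h
    obtain ⟨a, b, hab⟩ := List.append_of_mem hm
    exact ⟨a, b, by simp [hab]⟩
  · right
    rw [awFindNl] at h ⊢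
    obtain ⟨h1, h2, h3⟩ := PySem.Chars.findFrom_natCast_spec s ['\n'] k hk h
    have hnn : (0 : Int) ≤ PySem.Chars.findFrom s ['\n'] (k : Int) :=
      le_trans (Int.natCast_nonneg k) h1
    obtain ⟨n, hEn⟩ : ∃ n : Nat, PySem.Chars.findFrom s ['\n'] (k : Int) = (n : Int) :=
      ⟨_, (Int.toNat_of_nonneg hnn).symm⟩
    rw [hEn] at h1 h2 h3
    simp only [Int.toNat_natCast] at h2 h3
    have hkn : k ≤ n := by exact_mod_cast h1
    obtain ⟨t, ht⟩ := h2
    have hdn : s.drop n ≠ [] := by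
      intro h0; rw [h0] at ht; simp at ht
    have hnlt : n < s.length := by
      by_contra hcon
      exact hdn (List.drop_eq_nil_iff.2 (by omega))
    have ht' : s.drop (n + 1) = t := by
      have hdd : s.drop (n + 1) = (s.drop n).drop 1 := by rw [List.drop_drop]
      rw [hdd, ← ht]; simp
    have hdropn : s.drop n = '\n' :: s.drop (n + 1) := by
      rw [ht', ← ht]; simp
    have hlt : ((s.drop k).take (n - k)).length = n - k := by
      simp only [List.length_take, List.length_drop]; omega
    refine ⟨(s.drop k).take (n - k), ?_, ?_, ?_, ?_⟩
    · intro hm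
      obtain ⟨i, hi, hgi⟩ := List.mem_iff_getElem.1 hm
      have hilen : i < n - k := by rw [hlt] at hi; exact hi
      refine h3 (k + i) (by omega) (by omega) ?_
      rw [aw_singleton_prefix_iff]
      rw [List.getElem?_drop]
      have h4 : s[k + i]? = (s.drop k)[i]? := by rw [List.getElem?_drop]
      rw [Nat.add_zero, h4, ← List.getElem?_take_of_lt hilen,
        List.getElem?_eq_getElem hi, hgi]
    · rw [hlt]
      have he : k + (n - k) + 1 = n + 1 := by omega
      rw [he]
      conv_lhs => rw [← List.take_append_drop (n - k) (s.drop k)]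
      rw [List.drop_drop]
      have he2 : k + (n - k) = n := by omega
      rw [he2, hdropn]
    · rw [hlt, hEn]; omega
    · rw [hlt]; omega

theorem aw_splitOn_single {t : List Char} (h : '\n' ∉ t) : t.splitOn '\n' = [t] := by
  apply List.splitOnP_eq_single
  intro x hx
  simp only [beq_iff_eq]
  rintro rfl; exact h hx

theorem aw_splitOn_step {seg : List Char} (h : '\n' ∉ seg) (rest : List Char) :
    (seg ++ '\n' :: rest).splitOn '\n' = seg :: rest.splitOn '\n' := by
  apply List.splitOnP_first
  · intro x hx; simp only [beq_iff_eq]; rintro rfl; exact h hx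
  · simp

-- seg facts used by both loop lemmas
theorem aw_seg_get (s seg : List Char) (k : Nat)
    (hdec : s.drop k = seg ++ '\n' :: s.drop (k + seg.length + 1)) (hpos : 0 < seg.length) :
    s[k + seg.length - 1]? = seg.getLast? := by
  have h1 : s[k + seg.length - 1]? = (s.drop k)[seg.length - 1]? := by
    rw [List.getElem?_drop]
    congr 1; omega
  rw [h1, hdec, List.getElem?_append, if_pos (by omega), List.getLast?_eq_getElem?]

theorem aw_pyGet (s seg : List Char) (k : Nat)
    (hdec : s.drop k = seg ++ '\n' :: s.drop (k + seg.length + 1)) (hpos : 0 < seg.length) :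
    PySem.List.pyGet? s ((k : Int) + (seg.length : Int) - 1) = seg.getLast? := by
  have hcast : (k : Int) + (seg.length : Int) - 1 = ((k + seg.length - 1 : Nat) : Int) := by omega
  rw [hcast, PySem.List.pyGet?_natCast, aw_seg_get s seg k hdec hpos]

theorem aw_getLastD_cons_of_ne_nil {α : Type} {l : List α} (h : l ≠ []) (a b : α) :
    (a :: l).getLastD b = l.getLastD b := by
  cases l with
  | nil => exact absurd rfl h
  | cons x xs => simp

theorem aw_splitOn_ne_nil (c : Char) (l : List Char) : l.splitOn c ≠ [] := by
  simp only [List.splitOn]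
  exact List.splitOnP_ne_nil _ _

-- A's per-line max update equals the max update B performs on the same line
theorem aw_line_update (s seg : List Char) (k : Nat)
    (hdec : s.drop k = seg ++ '\n' :: s.drop (k + seg.length + 1)) (m : Int) :
    (if (k : Int) + (seg.length : Int) > (k : Int) ∧
        PySem.List.pyGet? s ((k : Int) + (seg.length : Int) - 1) = some '\\' then
      (if (k : Int) + (seg.length : Int) - 1 - (k : Int) > m then
        (k : Int) + (seg.length : Int) - 1 - (k : Int) else m)
    else m)
    = if PySem.Chars.endswith seg ['\\'] = true ∧ (seg.length : Int) - 1 > m then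
        (seg.length : Int) - 1 else m := by
  rcases Nat.eq_zero_or_pos seg.length with h0 | hpos
  · obtain rfl : seg = [] := List.length_eq_zero_iff.1 h0
    rw [if_neg (by rintro ⟨h1, -⟩; simp at h1), if_neg (by
      rintro ⟨h1, -⟩
      rw [aw_endswith_iff] at h1; simp at h1)]
  · by_cases hq : seg.getLast? = some '\\'
    · rw [if_pos ⟨by omega, by rw [aw_pyGet s seg k hdec hpos, hq]⟩]
      have hends := (aw_endswith_iff seg '\\').2 hq
      by_cases hw : (seg.length : Int) - 1 > m
      · rw [if_pos (by omega), if_pos ⟨hends, hw⟩]; omega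
      · rw [if_neg (by omega), if_neg (by rintro ⟨-, h⟩; exact hw h)]
    · rw [if_neg, if_neg]
      · rintro ⟨h1, -⟩; exact hq ((aw_endswith_iff seg '\\').1 h1)
      · rintro ⟨-, hg⟩; rw [aw_pyGet s seg k hdec hpos] at hg; exact hq hg

theorem aw_maxLoop_eq (s : List Char) :
    ∀ (fuel k : Nat) (m : Int), k ≤ s.length → s.length - k < fuel →
    awMaxLoop s fuel (k : Int) m
      = ((s.drop k).splitOn '\n').dropLast.foldl (fun m part =>
          if PySem.Chars.endswith part ['\\'] ∧ (part.length : Int) - 1 > m then (part.length : Int) - 1 else m) m := by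
  intro fuel
  induction fuel with
  | zero => intro k m hk hf; omega
  | succ f ih =>
    intro k m hk hf
    rcases aw_findNl_step s k hk with ⟨hfind, hmem⟩ | ⟨seg, hseg, hdec, hfind, hlt⟩
    · rw [awMaxLoop]
      simp only [hfind, aw_splitOn_single hmem]
      norm_num
    · rw [awMaxLoop]
      simp only [hfind]
      rw [if_neg (by omega : ¬ ((k : Int) + (seg.length : Int) < 0)),
        aw_line_update s seg k hdec m]
      have hcast : (k : Int) + (seg.length : Int) + 1 = ((k + seg.length + 1 : Nat) : Int) := by
        push_cast; ring
      rw [hcast, ih (k + seg.length + 1) _ (by omega) (by omega), hdec,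
        aw_splitOn_step hseg (s.drop (k + seg.length + 1)),
        List.dropLast_cons_of_ne_nil (aw_splitOn_ne_nil _ _), List.foldl_cons]

theorem aw_buildLoop_eq (s : List Char) :
    ∀ (fuel k : Nat) (acc : List Char) (mx : Int), k ≤ s.length → s.length - k < fuel →
    awBuildLoop s fuel (k : Int) acc mx =
      (acc ++ (((s.drop k).splitOn '\n').dropLast.map (fun seg => awPad mx seg ++ ['\n'])).flatten,
       ((s.length - (((s.drop k).splitOn '\n').getLastD []).length : Nat) : Int)) := by
  intro fuel
  induction fuel with
  | zero => intro k acc mx hk hf; omega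
  | succ f ih =>
    intro k acc mx hk hf
    rcases aw_findNl_step s k hk with ⟨hfind, hmem⟩ | ⟨seg, hseg, hdec, hfind, hlt⟩
    · rw [awBuildLoop]
      simp only [hfind, aw_splitOn_single hmem]
      norm_num
      omega
    · have hpadnl : ∀ m : Int, awBuildLoop s (f + 1) (k : Int) acc m =
          awBuildLoop s f ((k : Int) + (seg.length : Int) + 1) (acc ++ awPad m seg ++ ['\n']) m := by
        intro m
        rw [awBuildLoop]
        simp only [hfind]
        rw [if_neg (by omega : ¬ ((k : Int) + (seg.length : Int) < 0))]
        have hsl2 : PySem.List.slice s (some (k : Int)) (some ((k : Int) + (seg.length : Int) + 1))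
            = seg ++ ['\n'] := by
          have hcast : (k : Int) + (seg.length : Int) + 1 = ((k + seg.length + 1 : Nat) : Int) := by
            push_cast; ring
          rw [hcast, PySem.List.slice_natCast]
          have he : k + seg.length + 1 - k = seg.length + 1 := by omega
          rw [he, hdec, List.take_append]
          simp
        rcases Nat.eq_zero_or_pos seg.length with h0 | hpos
        · obtain rfl : seg = [] := List.length_eq_zero_iff.1 h0
          rw [if_neg (by rintro ⟨h1, -⟩; simp at h1)]
          rw [hsl2, awPad, if_neg (by rw [aw_endswith_iff]; simp)]
          simp
        · have hsl1 : PySem.List.slice s (some (k : Int)) (some ((k : Int) + (seg.length : Int) - 1))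
              = seg.dropLast := by
            have hcast : (k : Int) + (seg.length : Int) - 1 = ((k + seg.length - 1 : Nat) : Int) := by
              omega
            rw [hcast, PySem.List.slice_natCast]
            have he : k + seg.length - 1 - k = seg.length - 1 := by omega
            rw [he, hdec, List.take_append]
            simp [List.dropLast_eq_take]
          by_cases hq : seg.getLast? = some '\\'
          · rw [if_pos ⟨by omega, by rw [aw_pyGet s seg k hdec hpos, hq]⟩]
            have hends := (aw_endswith_iff seg '\\').2 hq
            by_cases hw : (k : Int) + (seg.length : Int) - 1 - (k : Int) < m
            · rw [if_pos hw, hsl1, awPad, if_pos hends, PySem.List.slice_to_neg_one]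
              have hrep : (m - ((k : Int) + (seg.length : Int) - 1 - (k : Int))).toNat
                  = (m - ((seg.length : Int) - 1)).toNat := by omega
              rw [hrep]
              simp [List.append_assoc]
            · rw [if_neg hw, hsl2, awPad, if_pos hends, PySem.List.slice_to_neg_one]
              have hrep : (m - ((seg.length : Int) - 1)).toNat = 0 := by omega
              rw [hrep, List.replicate_zero]
              have hfix : seg.dropLast ++ [] ++ ['\\'] = seg := by
                have hne : seg ≠ [] := List.ne_nil_of_length_pos hpos
                have := List.dropLast_append_getLast? '\\' hq
                simpa using this
              rw [hfix]
              simp [List.append_assoc]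
          · rw [if_neg (by rintro ⟨-, hg⟩; rw [aw_pyGet s seg k hdec hpos] at hg; exact hq hg)]
            rw [hsl2, awPad, if_neg (fun hc => hq ((aw_endswith_iff seg '\\').1 hc))]
            simp [List.append_assoc]
      rw [hpadnl mx]
      have hcast : (k : Int) + (seg.length : Int) + 1 = ((k + seg.length + 1 : Nat) : Int) := by
        push_cast; ring
      rw [hcast, ih (k + seg.length + 1) _ mx (by omega) (by omega), hdec,
        aw_splitOn_step hseg (s.drop (k + seg.length + 1)),
        List.dropLast_cons_of_ne_nil (aw_splitOn_ne_nil _ _),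
        aw_getLastD_cons_of_ne_nil (aw_splitOn_ne_nil _ _)]
      rw [List.map_cons, List.flatten_cons]
      congr 1
      simp [List.append_assoc]

theorem aw_splitOn_last_suffix (t : List Char) : ((t.splitOn '\n').getLastD []) <:+ t := by
  induction t with
  | nil => simp [List.splitOn, List.splitOnP_nil]
  | cons c r ih =>
    by_cases hc : c = '\n'
    · subst hc
      have h1 : ('\n' :: r).splitOn '\n' = [] :: r.splitOn '\n' := by
        simp [List.splitOn, List.splitOnP_cons]
      rw [h1, aw_getLastD_cons_of_ne_nil (aw_splitOn_ne_nil _ _)]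
      exact ih.trans (List.suffix_cons _ _)
    · have h1 : (c :: r).splitOn '\n' = (r.splitOn '\n').modifyHead (c :: ·) := by
        simp [List.splitOn, List.splitOnP_cons, hc]
      rw [h1]
      cases hparts : r.splitOn '\n' with
      | nil => exact absurd hparts (aw_splitOn_ne_nil _ _)
      | cons x rest =>
        cases rest with
        | nil =>
          have hx : x = r := by
            have h := List.intercalate_splitOn r '\n'
            rw [hparts] at h
            simpa [List.intercalate] using h
          subst hx
          simp
        | cons y rest' =>
          rw [List.modifyHead_cons, aw_getLastD_cons_of_ne_nil (by simp),
            ← aw_getLastD_cons_of_ne_nil (by simp : (y :: rest' : List (List Char)) ≠ []) x]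
          rw [← hparts]
          exact ih.trans (List.suffix_cons _ _)

theorem aw_flatten_join (xs : List (List Char)) (h : xs ≠ []) :
    (xs.map (fun x => x ++ ['\n'])).flatten = PySem.Chars.join ['\n'] xs ++ ['\n'] := by
  induction xs with
  | nil => exact absurd rfl h
  | cons x rest ih =>
    cases rest with
    | nil => simp [PySem.Chars.join_singleton]
    | cons y rest' =>
      rw [List.map_cons, List.flatten_cons, ih (by simp), PySem.Chars.join_cons_cons]
      simp [List.append_assoc]

-- re-padding an already-padded wrapper line to a larger-or-equal width equals padding the
-- original line to that width (the correctness of B's online repair step)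
theorem aw_pad_pad (part : List Char) (m w : Int)
    (hp : PySem.Chars.endswith part ['\\'] = true)
    (h1 : (part.length : Int) - 1 ≤ m) (h2 : m ≤ w) :
    awPad w (awPad m part) = awPad w part := by
  have hq := (aw_endswith_iff part '\\').1 hp
  have hne : part ≠ [] := by rintro rfl; simp at hq
  have hlen : 0 < part.length := List.length_pos_of_ne_nil hne
  have hq2 : PySem.Chars.endswith (part.dropLast ++
      List.replicate (m - ((part.length : Int) - 1)).toNat ' ' ++ ['\\']) ['\\'] = true := by
    rw [aw_endswith_iff]; simp
  simp only [awPad, hp, hq2, if_true, PySem.List.slice_to_neg_one, List.dropLast_concat]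
  have hR : (w - (((part.dropLast ++ List.replicate (m - ((part.length : Int) - 1)).toNat ' '
      ++ ['\\']).length : Int) - 1)).toNat = (w - m).toNat := by
    simp only [List.length_append, List.length_replicate, List.length_dropLast,
      List.length_cons, List.length_nil]
    omega
  rw [hR]
  congr 1
  rw [List.append_assoc]
  congr 1
  rw [← List.replicate_add]
  congr 1
  omega

-- B's online fold, characterised: the state is always the prefix padded to the running max
theorem aw_fold_online (ps : List (List Char)) :
    ∀ (acc : List (List Char)) (m : Int),
    (∀ l ∈ acc, PySem.Chars.endswith l ['\\'] = true → (l.length : Int) - 1 ≤ m) →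
    ps.foldl awStep (acc.map (awPad m), m)
      = ((acc ++ ps).map (awPad (ps.foldl (fun m part =>
            if PySem.Chars.endswith part ['\\'] ∧ (part.length : Int) - 1 > m then
              (part.length : Int) - 1 else m) m)),
         ps.foldl (fun m part =>
            if PySem.Chars.endswith part ['\\'] ∧ (part.length : Int) - 1 > m then
              (part.length : Int) - 1 else m) m) := by
  induction ps with
  | nil => intro acc m _; simp
  | cons p rest ih =>
    intro acc m hinv
    rw [List.foldl_cons, List.foldl_cons]
    by_cases hc : PySem.Chars.endswith p ['\\'] = true ∧ (p.length : Int) - 1 > m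
    · rw [awStep, if_pos hc]
      simp only
      rw [if_pos hc]
      have hmap : (acc.map (awPad m)).map (fun l => awPad ((p.length : Int) - 1) l)
          = acc.map (awPad ((p.length : Int) - 1)) := by
        rw [List.map_map]
        apply List.map_congr_left
        intro l hl
        simp only [Function.comp_apply]
        by_cases hw : PySem.Chars.endswith l ['\\'] = true
        · exact aw_pad_pad l m _ hw (hinv l hl hw) (by omega)
        · rw [show awPad m l = l from by rw [awPad, if_neg hw]]
      rw [hmap]
      have hcons : acc.map (awPad ((p.length : Int) - 1)) ++ [awPad ((p.length : Int) - 1) p]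
          = (acc ++ [p]).map (awPad ((p.length : Int) - 1)) := by simp
      rw [hcons, ih (acc ++ [p]) ((p.length : Int) - 1) (by
        intro l hl hw
        rcases List.mem_append.1 hl with h | h
        · exact le_trans (hinv l h hw) (by omega)
        · simp only [List.mem_singleton] at h
          subst h; omega)]
      rw [List.append_assoc, List.singleton_append]
    · rw [awStep, if_neg hc]
      simp only
      rw [if_neg hc]
      have hcons : acc.map (awPad m) ++ [awPad m p] = (acc ++ [p]).map (awPad m) := by simp
      rw [hcons, ih (acc ++ [p]) m (by
        intro l hl hw
        rcases List.mem_append.1 hl with h | h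
        · exact hinv l h hw
        · simp only [List.mem_singleton] at h
          subst h
          by_contra hgt
          exact hc ⟨hw, by omega⟩)]
      rw [List.append_assoc, List.singleton_append]

-- ===== VERDICT (by name: the statement is the Claim_ definition above) =====
theorem align_wrappers_spec : Claim_equal_align_wrappers := by
  intro command _
  unfold Spec_align_wrappers
  simp only [align_wrappers, align_wrappers_alt]
  have hmax := aw_maxLoop_eq command.toList (command.toList.length + 1) 0 (-1) (by omega) (by omega)
  rw [List.drop_zero, Nat.cast_zero] at hmax
  rw [hmax]
  have hfold := aw_fold_online (command.toList.splitOn '\n').dropLast [] (-1)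
    (by intro l hl; simp at hl)
  simp only [List.map_nil, List.nil_append] at hfold
  rw [hfold]
  by_cases hmx : (command.toList.splitOn '\n').dropLast.foldl (fun m part =>
      if PySem.Chars.endswith part ['\\'] ∧ (part.length : Int) - 1 > m then
        (part.length : Int) - 1 else m) (-1) < 0
  · rw [if_pos hmx, if_pos hmx]
  · rw [if_neg hmx, if_neg hmx]
    set mx := (command.toList.splitOn '\n').dropLast.foldl (fun m part =>
      if PySem.Chars.endswith part ['\\'] ∧ (part.length : Int) - 1 > m then
        (part.length : Int) - 1 else m) (-1) with hmxdef
    have hinit : (command.toList.splitOn '\n').dropLast ≠ [] := by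
      intro hnil
      rw [hmxdef, hnil] at hmx
      simp at hmx
    have hbuild := aw_buildLoop_eq command.toList (command.toList.length + 1) 0 [] mx (by omega) (by omega)
    rw [List.drop_zero, Nat.cast_zero] at hbuild
    rw [hbuild]
    dsimp only
    set last := (command.toList.splitOn '\n').getLastD [] with hlastdef
    obtain ⟨pre, hpre⟩ := aw_splitOn_last_suffix command.toList
    rw [← hlastdef] at hpre
    have hle : last.length ≤ command.toList.length := by
      rw [← hpre]; simp
    have hdroplast : command.toList.drop (command.toList.length - last.length) = last := by
      rw [← hpre]
      exact List.drop_left' (by simp)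
    have hbody : (((command.toList.splitOn '\n').dropLast.map (fun seg => awPad mx seg ++ ['\n']))).flatten
        = PySem.Chars.join ['\n'] ((command.toList.splitOn '\n').dropLast.map (awPad mx)) ++ ['\n'] := by
      have hmm : (command.toList.splitOn '\n').dropLast.map (fun seg => awPad mx seg ++ ['\n'])
          = ((command.toList.splitOn '\n').dropLast.map (awPad mx)).map (fun x => x ++ ['\n']) := by
        rw [List.map_map]
        rfl
      rw [hmm, aw_flatten_join _ (by
        intro hnil
        rw [List.map_eq_nil_iff] at hnil
        exact hinit hnil)]
    by_cases hl : 0 < last.length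
    · rw [if_pos (by omega)]
      rw [PySem.List.slice_from_natCast, hdroplast, hbody]
      simp
    · rw [if_neg (by omega)]
      have hlnil : last = [] := List.length_eq_zero_iff.1 (by omega)
      rw [hbody, hlnil]
      simp
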